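-- pv_equiv track=rewrite | github.com/elastic-workflows-parsl-pmix/elastic-resource-manager | elastic_scheduler/core/hpc_scheduler.py | _walltime_seconds
-- ===== SOURCE A (Python) =====
-- def _walltime_seconds(wt: str | None) -> int:
--     """Parse walltime 'HH:MM:SS' (or 'MM:SS', or seconds) to seconds; 0 if unknown."""
--     if not wt:
--         return 0
--     try:
--         parts = [int(p) for p in str(wt).split(":")]
--         if len(parts) == 3:
--             h, m, s = parts
--         elif len(parts) == 2:
--             h, m, s = 0, parts[0], parts[1]
--         elif len(parts) == 1:
--             h, m, s = 0, 0, parts[0]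
--         else:
--             return 0
--         return h * 3600 + m * 60 + s
--     except Exception:
--         return 0
-- ===== SOURCE B (Python) =====
-- def _walltime_seconds(wt):
--     """Parse walltime 'HH:MM:SS' (or 'MM:SS', or seconds) to seconds; 0 if unknown."""
--     if not wt:
--         return 0
--     parts = str(wt).split(":")
--     if len(parts) > 3:
--         return 0
--     total = 0
--     for p in parts:
--         try:
--             total = total * 60 + int(p)
--         except Exception:
--             return 0
--     return total
-- ===== Notes on version B (the rewrite author's own statement) =====
-- stated objective: simpler
-- what changed: Replaces the length-branch that unpacks (h,m,s) and the closed-form h*3600+m*60+s with a single Horner fold over the split fields (total = total*60 + int(p)) guarded by len(parts) > 3.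
import Mathlib
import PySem

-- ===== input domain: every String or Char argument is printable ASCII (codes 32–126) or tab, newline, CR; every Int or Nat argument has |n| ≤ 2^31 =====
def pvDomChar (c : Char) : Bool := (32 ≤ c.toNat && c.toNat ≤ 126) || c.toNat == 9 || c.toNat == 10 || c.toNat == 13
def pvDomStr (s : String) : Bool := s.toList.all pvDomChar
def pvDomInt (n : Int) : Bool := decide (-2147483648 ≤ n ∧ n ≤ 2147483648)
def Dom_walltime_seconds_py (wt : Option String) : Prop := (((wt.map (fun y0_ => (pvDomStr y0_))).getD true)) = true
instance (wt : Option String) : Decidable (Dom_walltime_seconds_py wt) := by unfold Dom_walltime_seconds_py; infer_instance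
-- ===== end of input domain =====

-- B replaces A's length-branch that unpacks (h,m,s) and the closed form h*3600+m*60+s
-- with a Horner fold (total = total*60 + int(p)) over the split fields; objective: simpler.

-- ===== PORT A =====
-- the comprehension [int(p) for p in ...] under the try: none = some int() raised ValueError
def wsParseAll : List (List Char) → Option (List Int)
  | [] => some []
  | p :: rest =>
    match PySem.Int.ofChars? p with
    | none => none
    | some v =>
      match wsParseAll rest with
      | none => none
      | some vs => some (v :: vs)

def walltime_seconds_py (wt : Option String) : Int :=
  match wt with
  | none => 0
  | some w =>
    if w = "" then 0
    else
      match wsParseAll (PySem.Chars.splitOn w.toList [':']) with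
      | none => 0  -- except Exception: return 0
      | some parts =>
        match parts with
        | [h, m, s] => h * 3600 + m * 60 + s
        | [m, s] => 0 * 3600 + m * 60 + s
        | [s] => 0 * 3600 + 0 * 60 + s
        | _ => 0

-- ===== PORT B =====
-- the 'for p in parts' loop of Source B: per-field int(p) with early return 0 on failure
def wsHorner : List (List Char) → Int → Int
  | [], total => total
  | p :: rest, total =>
    match PySem.Int.ofChars? p with
    | none => 0
    | some v => wsHorner rest (total * 60 + v)

def walltime_seconds_py_alt (wt : Option String) : Int :=
  match wt with
  | none => 0
  | some w =>
    if w = "" then 0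
    else
      let parts := PySem.Chars.splitOn w.toList [':']
      if parts.length > 3 then 0 else wsHorner parts 0

-- ===== PRECONDITION & SPEC =====
def Spec_walltime_seconds_py (wt : Option String) (out : Int) : Prop := out = walltime_seconds_py_alt wt
instance (wt : Option String) (out : Int) : Decidable (Spec_walltime_seconds_py wt out) := by unfold Spec_walltime_seconds_py; infer_instance

-- ===== CLAIM (what is proved, stated in full; the proofs are below) =====
def Claim_equal_walltime_seconds_py : Prop := ∀ (wt : Option String), Dom_walltime_seconds_py wt → Spec_walltime_seconds_py wt (walltime_seconds_py wt)

-- ===== LEMMAS AND PROOFS =====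

theorem wsHorner_of_none (ps : List (List Char)) (t : Int)
    (h : wsParseAll ps = none) : wsHorner ps t = 0 := by
  induction ps generalizing t with
  | nil => simp [wsParseAll] at h
  | cons p rest ih =>
    cases hp : PySem.Int.ofChars? p with
    | none => simp [wsHorner, hp]
    | some v =>
      cases hr : wsParseAll rest with
      | none => simp [wsHorner, hp]; exact ih _ hr
      | some vs => simp [wsParseAll, hp, hr] at h

theorem wsHorner_of_some (ps : List (List Char)) (vs : List Int) (t : Int)
    (h : wsParseAll ps = some vs) :
    wsHorner ps t = vs.foldl (fun a v => a * 60 + v) t ∧ vs.length = ps.length := by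
  induction ps generalizing t vs with
  | nil =>
    simp [wsParseAll] at h
    subst h; simp [wsHorner]
  | cons p rest ih =>
    cases hp : PySem.Int.ofChars? p with
    | none => simp [wsParseAll, hp] at h
    | some v =>
      cases hr : wsParseAll rest with
      | none => simp [wsParseAll, hp, hr] at h
      | some vs' =>
        simp only [wsParseAll, hp, hr, Option.some.injEq] at h
        subst h
        obtain ⟨h1, h2⟩ := ih vs' (t * 60 + v) hr
        exact ⟨by simpa [wsHorner, hp, List.foldl] using h1, by simp [h2]⟩

-- ===== VERDICT (by name: the statement is the Claim_ definition above) =====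
theorem walltime_seconds_py_spec : Claim_equal_walltime_seconds_py := by
  intro wt _
  unfold Spec_walltime_seconds_py walltime_seconds_py walltime_seconds_py_alt
  cases wt with
  | none => rfl
  | some w =>
    by_cases hw : w = ""
    · simp [hw]
    · simp only [hw, if_false]
      cases h : wsParseAll (PySem.Chars.splitOn w.toList [':']) with
      | none =>
        rw [wsHorner_of_none _ _ h]
        split_ifs <;> rfl
      | some vs =>
        obtain ⟨hfold, hlen⟩ := wsHorner_of_some _ vs 0 h
        rw [hfold]
        match vs, hlen with
        | [], hlen => simp [← hlen, List.foldl]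
        | [s], hlen => simp [← hlen, List.foldl]
        | [m, s], hlen => simp [← hlen, List.foldl]
        | [h', m, s], hlen => simp [← hlen, List.foldl]; ring
        | a :: b :: c :: d :: rest, hlen =>
          have hgt : (PySem.Chars.splitOn w.toList [':']).length > 3 := by
            simp at hlen; omega
          simp [hgt]
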